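-- pv_equiv track=rewrite | github.com/kyukong/codingTest | src/programmers/level1/모의고사/모의고사(김유빈).py | solution
-- ===== SOURCE A (Python) =====
-- def solution(answers):
--     answer = []
--
--     first_answers = list([1, 2, 3, 4, 5] * ((len(answers) // 5) + 1))
--     second_answers = list([2, 1, 2, 3, 2, 4, 2, 5] * ((len(answers) // 8) + 1))
--     third_answers = list([3, 3, 1, 1, 2, 2, 4, 4, 5, 5] * ((len(answers) // 10) + 1))
--
--     count_list = [0] * 3
--     for i in range(len(answers)):
--         if answers[i] == first_answers[i]:
--             count_list[0] += 1
--         if answers[i] == second_answers[i]: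
--             count_list[1] += 1
--         if answers[i] == third_answers[i]:
--             count_list[2] += 1
--
--     max_answer = max(count_list)
--     for i in range(len(count_list)):
--         if max_answer == count_list[i]:
--             answer.append(i + 1)
--
--     answer.sort()
--
--     return answer
-- ===== SOURCE B (Python) =====
-- def solution(answers):
--     patterns = [[1, 2, 3, 4, 5], [2, 1, 2, 3, 2, 4, 2, 5], [3, 3, 1, 1, 2, 2, 4, 4, 5, 5]]
--     # One pass over the answers builds a frequency table keyed by (position mod 40, answer)
--     # (40 = lcm of the three pattern lengths); no answer is ever compared to a pattern entry.
--     freq = {}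
--     for i, a in enumerate(answers):
--         key = (i % 40, a)
--         freq[key] = freq.get(key, 0) + 1
--     # Each score is then 40 table lookups: positions congruent to r all see pattern value p[r % len(p)].
--     scores = [sum(freq.get((r, p[r % len(p)]), 0) for r in range(40)) for p in patterns]
--     m = max(scores)
--     return [i + 1 for i, s in enumerate(scores) if s == m]
-- ===== Notes on version B (the rewrite author's own statement) =====
-- stated objective: alternative
-- what changed: A pre-expands the three cycles and compares every answer against each of them in one interleaved loop; B never compares answers to patterns element-wise: one pass builds a frequency table keyed by (index mod 40, answer) (40 = lcm of the pattern lengths), and each pattern's score is then obtained by 40 table lookups.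
import Mathlib
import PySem

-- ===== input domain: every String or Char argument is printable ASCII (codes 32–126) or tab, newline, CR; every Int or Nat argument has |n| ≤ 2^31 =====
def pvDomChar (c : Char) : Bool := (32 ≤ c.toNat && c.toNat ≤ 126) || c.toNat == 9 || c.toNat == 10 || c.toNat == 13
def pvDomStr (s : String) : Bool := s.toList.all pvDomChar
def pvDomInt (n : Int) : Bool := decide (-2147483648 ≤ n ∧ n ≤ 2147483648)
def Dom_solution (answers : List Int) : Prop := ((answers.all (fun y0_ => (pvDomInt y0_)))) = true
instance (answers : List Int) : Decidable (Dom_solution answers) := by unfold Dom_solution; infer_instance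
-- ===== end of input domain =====

-- B replaces A's pre-expanded cycles and per-element pattern comparisons by a single pass
-- building a frequency table keyed by (index mod 40, answer) (40 = lcm of the pattern lengths);
-- each pattern's score is then 40 table lookups. Alternative algorithm, same asymptotic cost.

-- ===== PORT A =====
-- Python `p * k` (list repetition)
def pyListRep (p : List Int) : Nat → List Int
  | 0 => []
  | k + 1 => p ++ pyListRep p k

def solution (answers : List Int) : List Int :=
  let n := answers.length
  let firstAnswers := pyListRep [1, 2, 3, 4, 5] (n / 5 + 1)
  let secondAnswers := pyListRep [2, 1, 2, 3, 2, 4, 2, 5] (n / 8 + 1)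
  let thirdAnswers := pyListRep [3, 3, 1, 1, 2, 2, 4, 4, 5, 5] (n / 10 + 1)
  -- every index i < n is in range of answers and of each repeated list, so pyGetD is exact
  let countList :=
    (PySem.List.pyRange 0 (n : Int) 1).foldl
      (fun (c : Int × Int × Int) i =>
        let c0 := if PySem.List.pyGetD answers i 0 = PySem.List.pyGetD firstAnswers i 0 then c.1 + 1 else c.1
        let c1 := if PySem.List.pyGetD answers i 0 = PySem.List.pyGetD secondAnswers i 0 then c.2.1 + 1 else c.2.1
        let c2 := if PySem.List.pyGetD answers i 0 = PySem.List.pyGetD thirdAnswers i 0 then c.2.2 + 1 else c.2.2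
        (c0, c1, c2)) (0, 0, 0)
  let cl : List Int := [countList.1, countList.2.1, countList.2.2]
  let maxAnswer := (PySem.List.max? cl (fun x => x)).getD 0  -- cl is nonempty, so max? = some
  let answer :=
    (PySem.List.pyRange 0 3 1).foldl
      (fun acc i => if maxAnswer = PySem.List.pyGetD cl i 0 then acc ++ [i + 1] else acc) []
  PySem.List.sorted answer (fun x => x) false

-- ===== PORT B =====
-- the freq-building loop: freq[(i % 40, a)] = freq.get((i % 40, a), 0) + 1 over enumerate(answers)
def altFreq (answers : List Int) : PySem.Dict (Int × Int) Int :=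
  (PySem.List.enumerate answers 0).foldl
    (fun d ia =>
      let key := (PySem.Int.mod ia.1 40, ia.2)
      d.insert key (d.getD key 0 + 1)) PySem.Dict.empty

def solution_alt (answers : List Int) : List Int :=
  let patterns : List (List Int) := [[1, 2, 3, 4, 5], [2, 1, 2, 3, 2, 4, 2, 5], [3, 3, 1, 1, 2, 2, 4, 4, 5, 5]]
  let freq := altFreq answers
  -- sum(freq.get((r, p[r % len(p)]), 0) for r in range(40))
  let scores := patterns.map (fun p =>
    (PySem.List.pyRange 0 40 1).foldl
      (fun s r => s + freq.getD (r, PySem.List.pyGetD p (PySem.Int.mod r (p.length : Int)) 0) 0) 0)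
  let m := (PySem.List.max? scores (fun x => x)).getD 0
  (PySem.List.enumerate scores 0).foldl
    (fun acc is => if is.2 = m then acc ++ [is.1 + 1] else acc) []

-- ===== PRECONDITION & SPEC =====
def Spec_solution (answers : List Int) (out : List Int) : Prop := out = solution_alt answers
instance (answers : List Int) (out : List Int) : Decidable (Spec_solution answers out) := by unfold Spec_solution; infer_instance

-- ===== CLAIM (what is proved, stated in full; the proofs are below) =====
def Claim_equal_solution : Prop := ∀ (answers : List Int), Dom_solution answers → Spec_solution answers (solution answers)

-- ===== LEMMAS AND PROOFS =====

-- the common meeting point of both programs: the match count of pattern p against answers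
def mCount (answers p : List Int) : Int :=
  ((PySem.List.enumerate answers 0).countP
    (fun ia => ia.2 == PySem.List.pyGetD p (PySem.Int.mod ia.1 (p.length : Int)) 0) : Int)

theorem pyListRep_getD (p : List Int) :
    ∀ (k i : Nat), i < k * p.length →
      (pyListRep p k).getD i 0 = p.getD (i % p.length) 0 := by
  intro k
  induction k with
  | zero => intro i h; omega
  | succ k ih =>
      intro i h
      have hmul : (k + 1) * p.length = k * p.length + p.length := by ring
      by_cases hi : i < p.length
      · simp [pyListRep, List.getD, List.getElem?_append_left hi, Nat.mod_eq_of_lt hi]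
      · have hle : p.length ≤ i := Nat.le_of_not_lt hi
        have h1 : (pyListRep p (k + 1)).getD i 0 = (pyListRep p k).getD (i - p.length) 0 := by
          simp [pyListRep, List.getD, List.getElem?_append_right hle]
        rw [h1, ih (i - p.length) (by omega), Nat.mod_eq_sub_mod hle]

-- A's interleaved triple-state loop splits into three independent counting loops
theorem countsA (answers fa sa ta l : List Int) :
    ∀ (a b c : Int),
      l.foldl (fun (cc : Int × Int × Int) i =>
          ( if PySem.List.pyGetD answers i 0 = PySem.List.pyGetD fa i 0 then cc.1 + 1 else cc.1,
            if PySem.List.pyGetD answers i 0 = PySem.List.pyGetD sa i 0 then cc.2.1 + 1 else cc.2.1,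
            if PySem.List.pyGetD answers i 0 = PySem.List.pyGetD ta i 0 then cc.2.2 + 1 else cc.2.2)) (a, b, c)
        = (l.foldl (fun s i => if PySem.List.pyGetD answers i 0 = PySem.List.pyGetD fa i 0 then s + 1 else s) a,
           l.foldl (fun s i => if PySem.List.pyGetD answers i 0 = PySem.List.pyGetD sa i 0 then s + 1 else s) b,
           l.foldl (fun s i => if PySem.List.pyGetD answers i 0 = PySem.List.pyGetD ta i 0 then s + 1 else s) c) := by
  induction l with
  | nil => intro a b c; rfl
  | cons x t ih => intro a b c; simp only [List.foldl_cons]; rw [ih]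

-- A's counting pass over the pre-expanded list equals the match count mCount
theorem count_component (answers p : List Int) (hp : p ≠ []) (k : Nat)
    (hk : answers.length ≤ k * p.length) :
    (PySem.List.pyRange 0 (answers.length : Int) 1).foldl
        (fun (s : Int) i => if PySem.List.pyGetD answers i 0 = PySem.List.pyGetD (pyListRep p k) i 0 then s + 1 else s) 0
      = mCount answers p := by
  unfold mCount
  have hfun : (fun (s : Int) (ia : Int × Int) =>
        if ia.2 = PySem.List.pyGetD p (PySem.Int.mod ia.1 (p.length : Int)) 0 then s + 1 else s)
      = (fun s ia =>
        if (ia.2 == PySem.List.pyGetD p (PySem.Int.mod ia.1 (p.length : Int)) 0) = true then s + 1 else s) := by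
    funext s ia; simp
  rw [show ((PySem.List.enumerate answers 0).countP
        (fun ia => ia.2 == PySem.List.pyGetD p (PySem.Int.mod ia.1 (p.length : Int)) 0) : Int)
      = (PySem.List.enumerate answers 0).foldl
          (fun (s : Int) ia => if ia.2 = PySem.List.pyGetD p (PySem.Int.mod ia.1 (p.length : Int)) 0 then s + 1 else s) 0
    from by rw [hfun, PySem.List.foldl_count_if]; ring]
  rw [PySem.List.enumerate_eq_map_pyRange (d := 0), List.foldl_map]
  apply PySem.List.foldl_congr_mem
  intro s i hi
  have hib : 0 ≤ i ∧ i < (answers.length : Int) := (PySem.List.mem_pyRange_one).1 hi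
  obtain ⟨j, rfl⟩ : ∃ j : Nat, i = (j : Int) := ⟨i.toNat, (Int.toNat_of_nonneg hib.1).symm⟩
  have hj : j < answers.length := by exact_mod_cast hib.2
  have hlen : 0 < p.length := List.length_pos_of_ne_nil hp
  simp only [PySem.List.pyGetD_natCast, PySem.Int.mod_natCast, PySem.List.pyGetD_natCast]
  rw [pyListRep_getD p k j (by omega)]

theorem length_lt_rep (n d : Nat) (hd : 0 < d) : n < (n / d + 1) * d := by
  have h1 := Nat.div_add_mod n d
  have h2 := Nat.mod_lt n hd
  have h3 : (n / d + 1) * d = d * (n / d) + d := by ring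
  omega

-- the indicator sum over a nodup list of residues containing x.1
theorem ind_sum (g : Int → Int) (x : Int × Int) :
    ∀ (R : List Int), R.Nodup → x.1 ∈ R →
      (R.map (fun r => if x == (r, g r) then (1 : Int) else 0)).sum
        = if x.2 = g x.1 then 1 else 0 := by
  intro R
  induction R with
  | nil => intro _ h; cases h
  | cons r R ih =>
      intro hnd hx
      simp only [List.map_cons, List.sum_cons]
      rcases List.mem_cons.1 hx with h1 | h1
      · subst h1
        have hnotin : x.1 ∉ R := (List.nodup_cons.1 hnd).1
        have hz : (R.map (fun r => if x == (r, g r) then (1 : Int) else 0)).sum = 0 := by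
          apply List.sum_eq_zero
          intro y hy
          obtain ⟨r', hr', rfl⟩ := List.mem_map.1 hy
          have : ¬ (x == (r', g r')) = true := by
            simp only [beq_iff_eq]
            intro hxe
            have hx1 : x.1 = r' := congrArg Prod.fst hxe
            exact hnotin (hx1 ▸ hr')
          simp [this]
        rw [hz]
        by_cases h2 : x.2 = g x.1
        · have : (x == (x.1, g x.1)) = true := by simp [beq_iff_eq]; exact Prod.ext rfl h2
          simp [this, h2]
        · have : ¬ (x == (x.1, g x.1)) = true := by
            simp only [beq_iff_eq]
            intro hxe
            exact h2 (congrArg Prod.snd hxe)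
          simp [this, h2]
      · have hne : x.1 ≠ r := by
          intro he; exact (List.nodup_cons.1 hnd).1 (he ▸ h1)
        have : ¬ (x == (r, g r)) = true := by
          simp only [beq_iff_eq]
          intro hxe
          exact hne (congrArg Prod.fst hxe)
        rw [if_neg this, ih (List.nodup_cons.1 hnd).2 h1]
        ring

-- summing per-residue counts over all residues recovers the plain match count
theorem sum_count_gen (g : Int → Int) (R : List Int) (hR : R.Nodup) :
    ∀ (L : List (Int × Int)), (∀ x ∈ L, x.1 ∈ R) →
      (R.map (fun r => ((L.count (r, g r)) : Int))).sum
        = (L.countP (fun x => x.2 == g x.1) : Int) := by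
  intro L
  induction L with
  | nil => intro _; simp
  | cons x L ih =>
      intro hmem
      have hx : x.1 ∈ R := hmem x (List.mem_cons_self)
      have hcnt : (fun r => (((x :: L).count (r, g r)) : Int))
          = (fun r => ((L.count (r, g r)) : Int) + (if x == (r, g r) then (1 : Int) else 0)) := by
        funext r
        rw [List.count_cons]
        by_cases h : ((r, g r) == x) = true
        · have h' : (x == (r, g r)) = true := by simp only [beq_iff_eq] at h ⊢; exact h.symm
          simp [h']
        · have h' : ¬ (x == (r, g r)) = true := by
            simp only [beq_iff_eq] at h ⊢; intro he; exact h he.symm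
          simp [h']
      rw [hcnt, PySem.List.sum_map_add_int, ih (fun y hy => hmem y (List.mem_cons_of_mem _ hy)),
          ind_sum g x R hR hx, List.countP_cons]
      by_cases h : x.2 = g x.1 <;> simp [h]

-- residues of enumerate keys all lie in range(40)
theorem key_mem_range (answers : List Int) :
    ∀ x ∈ (PySem.List.enumerate answers 0).map (fun ia => (PySem.Int.mod ia.1 40, ia.2)),
      x.1 ∈ PySem.List.pyRange 0 40 1 := by
  intro x hx
  obtain ⟨ia, _, rfl⟩ := List.mem_map.1 hx
  exact PySem.List.mem_pyRange_one.2
    ⟨PySem.Int.mod_nonneg ia.1 (by norm_num), PySem.Int.mod_lt ia.1 (by norm_num)⟩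

-- (i % 40) % len(p) = i % len(p) when len(p) divides 40
theorem modmod (i : Int) (d : Int) (hd : 0 < d) (hdvd : d ∣ 40) :
    PySem.Int.mod (PySem.Int.mod i 40) d = PySem.Int.mod i d := by
  rw [PySem.Int.mod_eq_emod_of_pos hd, PySem.Int.mod_eq_emod_of_pos hd,
      PySem.Int.mod_eq_emod_of_pos (by norm_num : (0:Int) < 40)]
  exact Int.emod_emod_of_dvd i hdvd

-- B's 40 table lookups for pattern p equal the match count mCount
theorem scoreB_eq (answers p : List Int) (hp : 0 < p.length) (hdvd : ((p.length : Int)) ∣ 40) :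
    (PySem.List.pyRange 0 40 1).foldl
        (fun s r => s + (altFreq answers).getD (r, PySem.List.pyGetD p (PySem.Int.mod r (p.length : Int)) 0) 0) 0
      = mCount answers p := by
  have hfreq : altFreq answers
      = ((PySem.List.enumerate answers 0).map (fun ia => (PySem.Int.mod ia.1 40, ia.2))).foldl
          (fun d x => d.insert x (d.getD x 0 + 1)) PySem.Dict.empty := by
    unfold altFreq
    rw [List.foldl_map]
  set L := (PySem.List.enumerate answers 0).map (fun ia => (PySem.Int.mod ia.1 40, ia.2)) with hL
  have hget : ∀ v, (altFreq answers).getD v 0 = (L.count v : Int) := by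
    intro v
    rw [hfreq, PySem.Dict.getD_foldl_insert_add_one, PySem.Dict.getD_empty]
    ring
  rw [PySem.List.foldl_add]
  simp only [hget, zero_add]
  rw [sum_count_gen _ (PySem.List.pyRange 0 40 1) (PySem.List.nodup_pyRange_one 0 40) L
        (key_mem_range answers)]
  unfold mCount
  congr 1
  rw [hL, List.countP_map]
  apply List.countP_congr
  intro ia _
  simp only [Function.comp]
  rw [show PySem.List.pyGetD p (PySem.Int.mod (PySem.Int.mod ia.1 40) (p.length : Int)) 0
      = PySem.List.pyGetD p (PySem.Int.mod ia.1 (p.length : Int)) 0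
    from by rw [modmod ia.1 (p.length : Int) (by exact_mod_cast hp) hdvd]]

-- ===== VERDICT (by name: the statement is the Claim_ definition above) =====

theorem solution_spec : Claim_equal_solution := by
  intro answers _
  unfold Spec_solution solution solution_alt
  simp only []
  rw [countsA]
  rw [count_component answers [1,2,3,4,5] (by simp) (answers.length / 5 + 1)
        (Nat.le_of_lt (by simpa using length_lt_rep answers.length 5 (by norm_num)))]
  rw [count_component answers [2,1,2,3,2,4,2,5] (by simp) (answers.length / 8 + 1)
        (Nat.le_of_lt (by simpa using length_lt_rep answers.length 8 (by norm_num)))]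
  rw [count_component answers [3,3,1,1,2,2,4,4,5,5] (by simp) (answers.length / 10 + 1)
        (Nat.le_of_lt (by simpa using length_lt_rep answers.length 10 (by norm_num)))]
  simp only [List.map_cons, List.map_nil]
  simp only [scoreB_eq answers [1,2,3,4,5] (by norm_num) (by norm_num),
      scoreB_eq answers [2,1,2,3,2,4,2,5] (by norm_num) (by norm_num),
      scoreB_eq answers [3,3,1,1,2,2,4,4,5,5] (by norm_num) (by norm_num)]
  have hr : PySem.List.pyRange 0 3 1 = [0, 1, 2] := by decide
  rw [hr]
  simp only [PySem.List.enumerate_cons, PySem.List.enumerate_nil,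
    List.foldl_cons, List.foldl_nil, PySem.List.pyGetD_ofNat']
  generalize mCount answers [1,2,3,4,5] = s1
  generalize mCount answers [2,1,2,3,2,4,2,5] = s2
  generalize mCount answers [3,3,1,1,2,2,4,4,5,5] = s3
  generalize (PySem.List.max? [s1, s2, s3] (fun x => x)).getD 0 = m
  by_cases h1 : s1 = m <;> by_cases h2 : s2 = m <;> by_cases h3 : s3 = m <;>
    simp only [h1, h2, h3, eq_comm (a := m), if_true, if_false, List.nil_append, List.append_assoc] <;>
    simp [h1, h2, h3] <;> decide
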